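-- pv_equiv track=rewrite | github.com/suyuexinghen/Aeloon | aeloon/core/agent/profiler.py | _extract_execute_metrics
-- ===== SOURCE A (Python) =====
-- def _parse_key_value_line(line: str) -> tuple[str, str] | None:
--     """Parse `Key: Value` lines used in deep-profile sections."""
--     if ":" not in line:
--         return None
--     key, value = line.split(":", 1)
--     key = key.strip()
--     value = value.strip()
--     if not key or not value:
--         return None
--     return key, value
--
-- def _extract_execute_metrics(lines: list[str]) -> tuple[str | None, str | None]:
--     """Extract execution counts from an Execute section."""
--     executions = None
--     failed = None
--     for line in lines:
--         parsed = _parse_key_value_line(line)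
--         if parsed is None:
--             continue
--         key, value = parsed
--         if key == "Executions":
--             executions = value
--         elif key == "Failed":
--             failed = value
--     return executions, failed
-- ===== SOURCE B (Python) =====
-- def _parse_key_value_line(line: str) -> tuple[str, str] | None:
--     """Parse `Key: Value` lines used in deep-profile sections."""
--     if ":" not in line:
--         return None
--     key, value = line.split(":", 1)
--     key = key.strip()
--     value = value.strip()
--     if not key or not value:
--         return None
--     return key, value
--
-- def _extract_execute_metrics(lines: list[str]) -> tuple[str | None, str | None]:
--     """Extract execution counts by scanning backwards for the last occurrence
--     of each key (first match wins in the reversed order), stopping early."""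
--     executions = None
--     failed = None
--     for line in reversed(lines):
--         if executions is not None and failed is not None:
--             break
--         parsed = _parse_key_value_line(line)
--         if parsed is None:
--             continue
--         key, value = parsed
--         if key == "Executions" and executions is None:
--             executions = value
--         elif key == "Failed" and failed is None:
--             failed = value
--     return executions, failed
-- ===== Notes on version B (the rewrite author's own statement) =====
-- stated objective: alternative
-- what changed: B scans the lines back-to-front taking the first match for each key (equivalent to A's forward last-wins overwrite) and breaks out of the loop as soon as both metrics are found, instead of A's forward pass that keeps overwriting two accumulators.
import Mathlib
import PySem

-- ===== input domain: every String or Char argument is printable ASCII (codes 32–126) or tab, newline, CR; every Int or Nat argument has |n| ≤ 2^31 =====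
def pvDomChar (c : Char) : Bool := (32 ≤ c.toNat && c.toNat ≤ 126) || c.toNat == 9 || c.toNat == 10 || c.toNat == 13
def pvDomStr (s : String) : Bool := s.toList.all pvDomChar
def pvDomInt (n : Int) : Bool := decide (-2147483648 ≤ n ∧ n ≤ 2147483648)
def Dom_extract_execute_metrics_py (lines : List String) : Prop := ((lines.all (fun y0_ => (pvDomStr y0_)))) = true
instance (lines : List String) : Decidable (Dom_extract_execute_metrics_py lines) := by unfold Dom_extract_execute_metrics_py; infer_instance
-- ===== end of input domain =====

-- B scans the lines back-to-front with first-match-wins and an early exit, instead of A's forward overwrite pass (alternative traversal, same return value).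

-- ===== PORT A =====
-- shared helper: Python's _parse_key_value_line, called verbatim by both A and B
def parse_key_value_line (line : String) : Option (String × String) :=
  if PySem.Str.isIn ":" line = false then none
  else
    match PySem.Str.splitMax? line ":" 1 with
    | some [k, v] =>
        let key := PySem.Str.strip k
        let value := PySem.Str.strip v
        if PySem.Str.len key == 0 || PySem.Str.len value == 0 then none
        else some (key, value)
    | _ => none   -- unreachable: sep = ":" ≠ "" and ":" ∈ line give exactly two pieces

def extract_execute_metrics_py (lines : List String) : Option String × Option String :=
  lines.foldl
    (fun s line =>
      match parse_key_value_line line with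
      | none => s
      | some (key, value) =>
          if key == "Executions" then (some value, s.2)
          else if key == "Failed" then (s.1, some value)
          else s)
    (none, none)

-- ===== PORT B =====
-- the reversed loop of Source B: first match wins, break when both are found
def extract_execute_metrics_alt_loop :
    List String → Option String → Option String → Option String × Option String
  | [], ex, fa => (ex, fa)
  | line :: rest, ex, fa =>
      if ex.isSome && fa.isSome then (ex, fa)   -- break
      else
        match parse_key_value_line line with
        | none => extract_execute_metrics_alt_loop rest ex fa
        | some (key, value) =>
            if key == "Executions" && ex.isNone then
              extract_execute_metrics_alt_loop rest (some value) fa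
            else if key == "Failed" && fa.isNone then
              extract_execute_metrics_alt_loop rest ex (some value)
            else
              extract_execute_metrics_alt_loop rest ex fa

def extract_execute_metrics_py_alt (lines : List String) : Option String × Option String :=
  extract_execute_metrics_alt_loop lines.reverse none none

-- ===== PRECONDITION & SPEC =====
def Spec_extract_execute_metrics_py (lines : List String) (out : Option String × Option String) : Prop := out = extract_execute_metrics_py_alt lines
instance (lines : List String) (out : Option String × Option String) : Decidable (Spec_extract_execute_metrics_py lines out) := by unfold Spec_extract_execute_metrics_py; infer_instance

-- ===== CLAIM (what is proved, stated in full; the proofs are below) =====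
def Claim_equal_extract_execute_metrics_py : Prop := ∀ (lines : List String), Dom_extract_execute_metrics_py lines → Spec_extract_execute_metrics_py lines (extract_execute_metrics_py lines)

-- ===== LEMMAS AND PROOFS =====

-- abbreviation for A's loop body, used only in the proofs below
def pvStepA (s : Option String × Option String) (line : String) : Option String × Option String :=
  match parse_key_value_line line with
  | none => s
  | some (key, value) =>
      if key == "Executions" then (some value, s.2)
      else if key == "Failed" then (s.1, some value)
      else s

theorem pvStepA_eq (s : Option String × Option String) (line : String) :
    pvStepA s line =
      ((pvStepA (none, none) line).1.or s.1, (pvStepA (none, none) line).2.or s.2) := by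
  unfold pvStepA
  cases h : parse_key_value_line line with
  | none => simp
  | some kv =>
    obtain ⟨k, v⟩ := kv
    by_cases h1 : k == "Executions" <;> by_cases h2 : k == "Failed" <;>
      simp [h1, h2]

-- A's fold from an arbitrary start state, expressed through the (none, none) start
theorem pvFoldA_eq (ls : List String) (s : Option String × Option String) :
    ls.foldl pvStepA s =
      ((ls.foldl pvStepA (none, none)).1.or s.1, (ls.foldl pvStepA (none, none)).2.or s.2) := by
  induction ls generalizing s with
  | nil => simp
  | cons l ls ih =>
    simp only [List.foldl_cons]
    rw [ih (pvStepA s l), ih (pvStepA (none, none) l), pvStepA_eq s l]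
    simp [Option.or_assoc]

-- once both metrics are found, B's loop stops and returns them unchanged
theorem pvLoopB_saturated (ls : List String) (e f : String) :
    extract_execute_metrics_alt_loop ls (some e) (some f) = (some e, some f) := by
  cases ls <;> simp [extract_execute_metrics_alt_loop]

-- B's loop from an arbitrary start state: earlier (= later in the original list) wins
theorem pvLoopB_eq (ls : List String) (ex fa : Option String) :
    extract_execute_metrics_alt_loop ls ex fa =
      (ex.or (extract_execute_metrics_alt_loop ls none none).1,
       fa.or (extract_execute_metrics_alt_loop ls none none).2) := by
  induction ls generalizing ex fa with
  | nil => simp [extract_execute_metrics_alt_loop]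
  | cons l ls ih =>
    set r := extract_execute_metrics_alt_loop ls none none with hr
    cases h : parse_key_value_line l with
    | none =>
      simp only [extract_execute_metrics_alt_loop, h]
      cases ex <;> cases fa <;> simp <;> (repeat rw [ih]) <;> simp [← hr]
    | some kv =>
      obtain ⟨k, v⟩ := kv
      simp only [extract_execute_metrics_alt_loop, h]
      by_cases h1 : k == "Executions" <;> by_cases h2 : k == "Failed"
      · have e1 : k = "Executions" := eq_of_beq h1
        have e2 : k = "Failed" := eq_of_beq h2
        simp [e1] at e2
      all_goals
        cases ex <;> cases fa <;> simp [h1, h2] <;>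
          (repeat rw [ih]) <;> simp [← hr]

-- B's loop splits over list append
theorem pvLoopB_append (xs ys : List String) (ex fa : Option String) :
    extract_execute_metrics_alt_loop (xs ++ ys) ex fa =
      extract_execute_metrics_alt_loop ys
        (extract_execute_metrics_alt_loop xs ex fa).1
        (extract_execute_metrics_alt_loop xs ex fa).2 := by
  induction xs generalizing ex fa with
  | nil => simp [extract_execute_metrics_alt_loop]
  | cons l xs ih =>
    simp only [List.cons_append, extract_execute_metrics_alt_loop]
    by_cases hb : ex.isSome && fa.isSome
    · obtain ⟨e, he⟩ := Option.isSome_iff_exists.mp (Bool.and_elim_left hb)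
      obtain ⟨f, hf⟩ := Option.isSome_iff_exists.mp (Bool.and_elim_right hb)
      subst he hf
      simp [pvLoopB_saturated]
    · simp only [hb]
      cases h : parse_key_value_line l with
      | none => exact ih ex fa
      | some kv =>
        obtain ⟨k, v⟩ := kv
        by_cases h1 : k == "Executions" && ex.isNone <;>
          by_cases h2 : k == "Failed" && fa.isNone <;>
          simp [h1, h2, ih]

-- B's loop on a single line equals A's step from the empty state
theorem pvLoopB_singleton (l : String) :
    extract_execute_metrics_alt_loop [l] none none = pvStepA (none, none) l := by
  simp only [extract_execute_metrics_alt_loop, pvStepA]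
  cases h : parse_key_value_line l with
  | none => rfl
  | some kv =>
    obtain ⟨k, v⟩ := kv
    by_cases h1 : k == "Executions" <;> by_cases h2 : k == "Failed" <;>
      simp [h1, h2]

theorem pvMain (lines : List String) :
    lines.foldl pvStepA (none, none) = extract_execute_metrics_alt_loop lines.reverse none none := by
  induction lines with
  | nil => rfl
  | cons l ls ih =>
    simp only [List.foldl_cons, List.reverse_cons]
    rw [pvFoldA_eq ls (pvStepA (none, none) l), pvLoopB_append, ih,
        pvLoopB_eq [l] (extract_execute_metrics_alt_loop ls.reverse none none).1
          (extract_execute_metrics_alt_loop ls.reverse none none).2,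
        pvLoopB_singleton]

-- ===== VERDICT (by name: the statement is the Claim_ definition above) =====
theorem extract_execute_metrics_py_spec : Claim_equal_extract_execute_metrics_py := by
  intro lines _
  unfold Spec_extract_execute_metrics_py extract_execute_metrics_py extract_execute_metrics_py_alt
  exact pvMain lines
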